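-- pv_equiv track=rewrite | github.com/dmwm/CRABServer | src/python/TaskWorker/Actions/DBSDataDiscovery.py | lumiOverlap
-- ===== SOURCE A (Python) =====
-- def lumiOverlap(d1, d2):
--     """
--     This finds if there are common run and lumis in two lists in the form of
--     {
--     '1': [1,2,3,4,6,7,8,9,10],
--     '2': [1,4,5,20]
--     }
--     """
--     commonRuns = d1.keys() & d2.keys()
--     if len(commonRuns) == 0:
--         return False
--
--     for run in commonRuns:
--         commonLumis = set(d1[run]).intersection(set(d2[run]))
--         if len(commonLumis) > 0 :
--             return True
--     return False
-- ===== SOURCE B (Python) =====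
-- def lumiOverlap(d1, d2):
--     commonRuns = d1.keys() & d2.keys()
--     s1 = {(r, l) for r in commonRuns for l in d1[r]}
--     s2 = {(r, l) for r in commonRuns for l in d2[r]}
--     return bool(s1 & s2)
-- ===== Notes on version B (the rewrite author's own statement) =====
-- stated objective: idiomatic
-- what changed: Replaces the per-run loop with early exit and per-run set intersections by building one flat set of (run, lumi) pairs per dict over the common runs and taking a single global intersection.
import Mathlib
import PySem

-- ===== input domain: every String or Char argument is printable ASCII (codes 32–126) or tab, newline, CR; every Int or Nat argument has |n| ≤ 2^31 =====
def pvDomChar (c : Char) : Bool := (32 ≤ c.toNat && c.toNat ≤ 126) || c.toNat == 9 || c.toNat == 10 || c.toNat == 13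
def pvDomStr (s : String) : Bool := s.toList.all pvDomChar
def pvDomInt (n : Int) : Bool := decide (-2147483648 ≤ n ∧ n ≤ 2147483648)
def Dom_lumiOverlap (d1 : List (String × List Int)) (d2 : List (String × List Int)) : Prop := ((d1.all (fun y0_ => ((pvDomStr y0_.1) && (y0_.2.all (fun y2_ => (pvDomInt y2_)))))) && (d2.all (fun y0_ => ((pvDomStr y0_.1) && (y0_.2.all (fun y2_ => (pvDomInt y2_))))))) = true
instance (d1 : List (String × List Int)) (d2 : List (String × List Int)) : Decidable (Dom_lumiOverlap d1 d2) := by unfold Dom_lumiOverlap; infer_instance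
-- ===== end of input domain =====

-- B builds one flat (run, lumi) pair-set per dict over the common runs and intersects once,
-- instead of A's per-run loop with early exit; objective: more idiomatic, same cost.

-- ===== PORT A =====
-- 'for run in commonRuns: if set(d1[run]) & set(d2[run]): return True' — early-exit loop;
-- d1[run]/d2[run] always hit (run is a common key), so getD [] is exact here.
def pvLoopA (D1 D2 : PySem.Dict String (List Int)) : List String → Bool
  | [] => false
  | run :: rest =>
    if PySem.Set.len (PySem.Set.inter (PySem.Set.ofList (D1.getD run [])) (PySem.Set.ofList (D2.getD run []))) > 0 then true
    else pvLoopA D1 D2 rest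

def lumiOverlap (d1 : List (String × List Int)) (d2 : List (String × List Int)) : Bool :=
  let D1 := PySem.Dict.ofList d1
  let D2 := PySem.Dict.ofList d2
  let commonRuns := PySem.Set.inter (PySem.Set.ofList D1.keys) D2.keys
  if PySem.Set.len commonRuns = 0 then false
  else pvLoopA D1 D2 commonRuns

-- ===== PORT B =====
def lumiOverlap_alt (d1 : List (String × List Int)) (d2 : List (String × List Int)) : Bool :=
  let D1 := PySem.Dict.ofList d1
  let D2 := PySem.Dict.ofList d2
  let commonRuns := PySem.Set.inter (PySem.Set.ofList D1.keys) D2.keys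
  let s1 := PySem.Set.ofList (commonRuns.flatMap (fun r => (D1.getD r []).map (fun l => (r, l))))
  let s2 := PySem.Set.ofList (commonRuns.flatMap (fun r => (D2.getD r []).map (fun l => (r, l))))
  !(PySem.Set.inter s1 s2).isEmpty

-- ===== PRECONDITION & SPEC =====
def Spec_lumiOverlap (d1 : List (String × List Int)) (d2 : List (String × List Int)) (out : Bool) : Prop := out = lumiOverlap_alt d1 d2
instance (d1 : List (String × List Int)) (d2 : List (String × List Int)) (out : Bool) : Decidable (Spec_lumiOverlap d1 d2 out) := by unfold Spec_lumiOverlap; infer_instance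

-- ===== CLAIM (what is proved, stated in full; the proofs are below) =====
def Claim_equal_lumiOverlap : Prop := ∀ (d1 : List (String × List Int)) (d2 : List (String × List Int)), Dom_lumiOverlap d1 d2 → Spec_lumiOverlap d1 d2 (lumiOverlap d1 d2)

-- ===== LEMMAS AND PROOFS =====

-- a PySem.Set (a list) is nonempty iff it has a member
lemma pv_len_pos_iff {α : Type} (s : List α) : (PySem.Set.len s > 0) ↔ ∃ x, x ∈ s := by
  simp [PySem.Set.len, List.length_pos_iff_exists_mem]

lemma pvLoopA_iff (D1 D2 : PySem.Dict String (List Int)) (rs : List String) :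
    pvLoopA D1 D2 rs = true ↔ ∃ r ∈ rs, ∃ l, l ∈ D1.getD r [] ∧ l ∈ D2.getD r [] := by
  induction rs with
  | nil => simp [pvLoopA]
  | cons run rest ih =>
    simp only [pvLoopA]
    split_ifs with h
    · constructor
      · intro _
        obtain ⟨x, hx⟩ := (pv_len_pos_iff _).mp h
        obtain ⟨h1, h2⟩ := (PySem.Set.mem_inter _ _ _).mp hx
        exact ⟨run, List.mem_cons_self, x, (PySem.Set.mem_ofList _ _).mp h1,
               (PySem.Set.mem_ofList _ _).mp h2⟩
      · intro _; rfl
    · rw [ih]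
      constructor
      · rintro ⟨r, hr, l, h1, h2⟩
        exact ⟨r, List.mem_cons_of_mem _ hr, l, h1, h2⟩
      · rintro ⟨r, hr, l, h1, h2⟩
        rcases List.mem_cons.mp hr with rfl | hr'
        · exact absurd ((pv_len_pos_iff _).mpr
            ⟨l, (PySem.Set.mem_inter _ _ _).mpr
              ⟨(PySem.Set.mem_ofList _ _).mpr h1, (PySem.Set.mem_ofList _ _).mpr h2⟩⟩) h
        · exact ⟨r, hr', l, h1, h2⟩

lemma pvAltB_iff (D1 D2 : PySem.Dict String (List Int)) (common : List String) :
    (!(PySem.Set.inter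
        (PySem.Set.ofList (common.flatMap (fun r => (D1.getD r []).map (fun l => (r, l)))))
        (PySem.Set.ofList (common.flatMap (fun r => (D2.getD r []).map (fun l => (r, l)))))).isEmpty) = true
      ↔ ∃ r ∈ common, ∃ l, l ∈ D1.getD r [] ∧ l ∈ D2.getD r [] := by
  rw [Bool.not_eq_eq_eq_not, Bool.not_true, List.isEmpty_eq_false_iff,
      ← List.length_pos_iff, List.length_pos_iff_exists_mem]
  constructor
  · rintro ⟨⟨r, l⟩, hx⟩
    obtain ⟨h1, h2⟩ := (PySem.Set.mem_inter _ _ _).mp hx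
    obtain ⟨r1, hr1, hm1⟩ := List.mem_flatMap.mp ((PySem.Set.mem_ofList _ _).mp h1)
    obtain ⟨r2, hr2, hm2⟩ := List.mem_flatMap.mp ((PySem.Set.mem_ofList _ _).mp h2)
    obtain ⟨l1, hl1, he1⟩ := List.mem_map.mp hm1
    obtain ⟨l2, hl2, he2⟩ := List.mem_map.mp hm2
    rw [Prod.mk.injEq] at he1 he2
    obtain ⟨rfl, rfl⟩ := he1
    obtain ⟨he2r, he2l⟩ := he2
    subst he2r; subst he2l
    exact ⟨_, hr1, _, hl1, hl2⟩
  · rintro ⟨r, hr, l, h1, h2⟩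
    refine ⟨(r, l), (PySem.Set.mem_inter _ _ _).mpr
      ⟨(PySem.Set.mem_ofList _ _).mpr ?_, (PySem.Set.mem_ofList _ _).mpr ?_⟩⟩
    · exact List.mem_flatMap.mpr ⟨r, hr, List.mem_map.mpr ⟨l, h1, rfl⟩⟩
    · exact List.mem_flatMap.mpr ⟨r, hr, List.mem_map.mpr ⟨l, h2, rfl⟩⟩

-- ===== VERDICT (by name: the statement is the Claim_ definition above) =====
theorem lumiOverlap_spec : Claim_equal_lumiOverlap := by
  intro d1 d2 _
  show lumiOverlap d1 d2 = lumiOverlap_alt d1 d2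
  unfold lumiOverlap lumiOverlap_alt
  dsimp only
  rw [Bool.eq_iff_iff, pvAltB_iff]
  split_ifs with hl
  · have hnil : List.length ((PySem.Set.ofList (PySem.Dict.ofList d1).keys).inter
        (PySem.Dict.ofList d2).keys) = 0 := by
      simp only [PySem.Set.len] at hl; exact_mod_cast hl
    rw [List.length_eq_zero_iff.mp hnil]
    simp
  · rw [pvLoopA_iff]
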